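-- pv_equiv track=rewrite | github.com/HassanBassiouny/optimaai-backend | app/services/report_service.py | _split_caption_and_table
-- ===== SOURCE A (Python) =====
-- def _split_caption_and_table(text: str) -> tuple[str, str]:
--     """Return (caption_text, table_block). Caption is anything before the
--     first |-line; table_block is the contiguous run of |-lines."""
--     lines = text.splitlines()
--     caption_lines = []
--     table_lines   = []
--     seen_pipe     = False
--     for ln in lines:
--         s = ln.strip()
--         if s.startswith("|"):
--             seen_pipe = True
--             table_lines.append(ln)
--         elif seen_pipe:
--             # Stop collecting table lines once we leave the pipe block
--             break
--         else:
--             caption_lines.append(ln)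
--     return "\n".join(caption_lines).strip(), "\n".join(table_lines).strip()
-- ===== SOURCE B (Python) =====
-- def _split_caption_and_table(text: str) -> tuple[str, str]:
--     """Run-length decomposition: split the lines into maximal runs of lines
--     with equal pipe-ness, then select the leading non-pipe run as the caption
--     and the first pipe run as the table."""
--     lines = text.splitlines()
--     n = len(lines)
--     gs = []
--     k = 0
--     while k < n:
--         flag = lines[k].strip().startswith("|")
--         i = k + 1
--         while i < n and lines[i].strip().startswith("|") == flag:
--             i += 1
--         gs.append((flag, lines[k:i]))
--         k = i
--     caption = gs[0][1] if gs and not gs[0][0] else []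
--     table = next((ls for f, ls in gs if f), [])
--     return "\n".join(caption).strip(), "\n".join(table).strip()
-- ===== Notes on version B (the rewrite author's own statement) =====
-- stated objective: alternative
-- what changed: Replaces A's stateful scan (seen_pipe flag with break, two accumulators) by a run-length grouping of the lines into maximal runs of equal pipe-ness, from which the caption (leading non-pipe run) and table (first pipe run) are selected afterwards.
import Mathlib
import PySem

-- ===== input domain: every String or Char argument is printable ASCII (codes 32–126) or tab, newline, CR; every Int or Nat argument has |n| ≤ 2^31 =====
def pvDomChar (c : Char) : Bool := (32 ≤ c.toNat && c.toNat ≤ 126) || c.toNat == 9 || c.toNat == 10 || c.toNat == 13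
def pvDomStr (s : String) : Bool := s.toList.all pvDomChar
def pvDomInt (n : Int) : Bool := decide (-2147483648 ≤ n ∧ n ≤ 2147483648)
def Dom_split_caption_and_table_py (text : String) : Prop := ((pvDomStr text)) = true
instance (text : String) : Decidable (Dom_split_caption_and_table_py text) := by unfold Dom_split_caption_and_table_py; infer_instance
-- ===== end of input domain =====

-- B replaces A's stateful scan (seen_pipe flag + break) by run-length grouping of the lines and selecting the relevant runs (alternative decomposition).

-- ===== PORT A =====
-- A's for-loop with its (caption_lines, table_lines, seen_pipe) state; break = returning the accumulators
def pvLoopA : List String → List String → List String → Bool → (List String × List String)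
  | [], caps, tabs, _ => (caps, tabs)
  | ln :: rest, caps, tabs, seen =>
    let s := PySem.Str.strip ln
    if PySem.Str.startswith s "|" then pvLoopA rest caps (tabs ++ [ln]) true
    else if seen then (caps, tabs)
    else pvLoopA rest (caps ++ [ln]) tabs seen

def split_caption_and_table_py (text : String) : String × String :=
  let lines := PySem.Str.splitlines text
  let r := pvLoopA lines [] [] false
  (PySem.Str.strip (PySem.Str.join "\n" r.1), PySem.Str.strip (PySem.Str.join "\n" r.2))

-- ===== PORT B =====
def pvPipe (ln : String) : Bool := PySem.Str.startswith (PySem.Str.strip ln) "|"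

-- Source B's outer while loop over k: each step takes the maximal run lines[k:i] of lines with
-- the same pipe-ness as lines[k] (the inner while computes i; here takeWhile/dropWhile) and
-- appends the group (flag, run); ported as the obvious recursion on the remaining lines.
def pvRuns (lines : List String) : List (Bool × List String) :=
  match lines with
  | [] => []
  | ln :: rest =>
    let flag := pvPipe ln
    (flag, ln :: rest.takeWhile (fun l => pvPipe l == flag)) ::
      pvRuns (rest.dropWhile (fun l => pvPipe l == flag))
termination_by lines.length
decreasing_by simp only [List.length_cons]; exact Nat.lt_succ_of_le (List.length_dropWhile_le _ _)

def split_caption_and_table_py_alt (text : String) : String × String :=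
  let gs := pvRuns (PySem.Str.splitlines text)
  let caption := match gs with                 -- gs[0][1] if gs and not gs[0][0] else []
    | (false, ls) :: _ => ls
    | _ => []
  let table := match gs.find? (fun g => g.1) with   -- next((ls for f, ls in gs if f), [])
    | some g => g.2
    | none => []
  (PySem.Str.strip (PySem.Str.join "\n" caption), PySem.Str.strip (PySem.Str.join "\n" table))

-- ===== PRECONDITION & SPEC =====
def Spec_split_caption_and_table_py (text : String) (out : String × String) : Prop := out = split_caption_and_table_py_alt text
instance (text : String) (out : String × String) : Decidable (Spec_split_caption_and_table_py text out) := by unfold Spec_split_caption_and_table_py; infer_instance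

-- ===== CLAIM (what is proved, stated in full; the proofs are below) =====
def Claim_equal_split_caption_and_table_py : Prop := ∀ (text : String), Dom_split_caption_and_table_py text → Spec_split_caption_and_table_py text (split_caption_and_table_py text)

-- ===== LEMMAS AND PROOFS =====

-- phase 2 of A's loop (seen = true): appends the leading pipe run
theorem pvLoopA_seen (lines caps tabs) :
    pvLoopA lines caps tabs true = (caps, tabs ++ lines.takeWhile pvPipe) := by
  induction lines generalizing tabs with
  | nil => simp [pvLoopA]
  | cons ln rest ih =>
    by_cases h : pvPipe ln = true
    · have h0 := h; simp [pvPipe] at h0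
      simp [pvLoopA, h0, h, ih, List.takeWhile_cons]
    · rw [Bool.not_eq_true] at h
      have h0 := h; simp [pvPipe] at h0
      simp [pvLoopA, h0, h, List.takeWhile_cons]

-- phase 1 of A's loop (seen = false, tabs empty)
theorem pvLoopA_unseen (lines caps) :
    pvLoopA lines caps [] false =
      (caps ++ lines.takeWhile (fun l => !pvPipe l),
       (lines.dropWhile (fun l => !pvPipe l)).takeWhile pvPipe) := by
  induction lines generalizing caps with
  | nil => simp [pvLoopA]
  | cons ln rest ih =>
    by_cases h : pvPipe ln = true
    · have h0 := h; simp [pvPipe] at h0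
      simp [pvLoopA, h0, h, pvLoopA_seen, List.takeWhile_cons, List.dropWhile_cons]
    · rw [Bool.not_eq_true] at h
      have h0 := h; simp [pvPipe] at h0
      simp [pvLoopA, h0, h, ih, List.takeWhile_cons, List.dropWhile_cons]

theorem beq_false_eq (b : Bool) : (b == false) = !b := by cases b <;> rfl

theorem dropWhile_idem {α : Type} (p : α → Bool) (l : List α) :
    (l.dropWhile p).dropWhile p = l.dropWhile p := by
  induction l with
  | nil => simp
  | cons a l ih => by_cases h : p a <;> simp [List.dropWhile_cons, h, ih]

-- the caption selected from the run groups is the leading non-pipe prefix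
theorem cap_runs (lines : List String) :
    (match pvRuns lines with | (false, ls) :: _ => ls | _ => []) =
      lines.takeWhile (fun l => !pvPipe l) := by
  cases lines with
  | nil => simp [pvRuns]
  | cons ln rest =>
    rw [pvRuns]
    by_cases h : pvPipe ln = true
    · simp [h, List.takeWhile_cons]
    · rw [Bool.not_eq_true] at h
      simp [h, List.takeWhile_cons]

-- the first pipe run among the groups is the pipe run after the leading non-pipe prefix
theorem tab_runs (lines : List String) :
    (match (pvRuns lines).find? (fun g => g.1) with | some g => g.2 | none => []) =
      (lines.dropWhile (fun l => !pvPipe l)).takeWhile pvPipe := by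
  fun_induction pvRuns lines with
  | case1 => simp
  | case2 ln rest flag ih =>
    by_cases h : pvPipe ln = true
    · simp only [flag] at *
      simp [List.find?_cons, h, List.dropWhile_cons, List.takeWhile_cons]
    · rw [Bool.not_eq_true] at h
      simp only [flag] at *
      simp only [h] at ih ⊢
      simp only [List.find?_cons, List.dropWhile_cons, h]
      simp only [beq_false_eq] at ih ⊢
      rw [ih, dropWhile_idem]
      simp

-- ===== VERDICT (by name: the statement is the Claim_ definition above) =====
theorem split_caption_and_table_py_spec : Claim_equal_split_caption_and_table_py := by
  intro text _
  unfold Spec_split_caption_and_table_py split_caption_and_table_py split_caption_and_table_py_alt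
  simp only [pvLoopA_unseen, List.nil_append, cap_runs, tab_runs]
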